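-- pv_equiv track=rewrite | github.com/SirDoggyJvla/meshing_transfinite_interpolation_2D | 2D_meshing/src/generalFunctions.py | selectColor
-- ===== SOURCE A (Python) =====
-- colorList   = ["red", "blue", "green", "orange", "black", "grey", 'purple']
--
-- def selectColor(lColor=[],i=0):
--     """
--     Function for Selection Next Color
--     -> if   colorList[i] exists, fine
--     -> else colorList[i] set as new color not existing
--     Input:
--     -> lColor    : List of Strings
--     -> integer
--     Output:
--     -> newColor  : Updated List of colors such that until i, colorList is Set
--     """
--     # Easy Case
--     n = len(lColor)
--     if n>i: return lColor
--     nTot = len(colorList)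
--
--     # Set of Colors
--     for ki in range(n,i):
--         for k in range(nTot):
--             a = colorList[k]
--             if a in lColor: continue
--             else: break
--         lColor.append(a)
--
--     return lColor
-- ===== SOURCE B (Python) =====
-- colorList   = ["red", "blue", "green", "orange", "black", "grey", 'purple']
--
-- def selectColor(lColor=[], i=0):
--     # B: compute the unused colors once (colorList order), then extend lColor
--     # with a slice of them, padding with the last color once exhausted.
--     n = len(lColor)
--     if n > i:
--         return lColor
--     need = i - n
--     unused = [c for c in colorList if c not in lColor]
--     fill = unused[:need] + [colorList[-1]] * (need - len(unused))
--     lColor.extend(fill)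
--     return lColor
-- ===== Notes on version B (the rewrite author's own statement) =====
-- stated objective: simpler
-- what changed: B replaces A's per-slot rescan of colorList (inner break-loop repeated for every appended slot) with one filter computing the unused colors, then a single slice-plus-padding extend; note both A and B mutate lColor in place, the equivalence proved is about the return value.
import Mathlib
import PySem

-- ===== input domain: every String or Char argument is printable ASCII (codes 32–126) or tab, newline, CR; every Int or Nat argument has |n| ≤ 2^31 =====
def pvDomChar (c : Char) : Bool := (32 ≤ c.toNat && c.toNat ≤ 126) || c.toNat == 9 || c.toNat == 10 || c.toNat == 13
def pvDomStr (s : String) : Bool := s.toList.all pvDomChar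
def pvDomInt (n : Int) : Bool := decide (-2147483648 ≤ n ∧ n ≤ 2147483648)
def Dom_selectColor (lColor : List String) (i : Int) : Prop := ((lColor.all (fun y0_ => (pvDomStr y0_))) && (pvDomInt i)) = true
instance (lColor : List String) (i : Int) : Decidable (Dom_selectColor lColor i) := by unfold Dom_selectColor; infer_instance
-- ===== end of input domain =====

-- B replaces A's per-slot rescan of colorList with one filter of the unused colors plus a
-- slice-and-pad extend (simpler decomposition); both Pythons mutate lColor in place, the
-- equivalence proved here is about the return value.

def pvColorList : List String := ["red", "blue", "green", "orange", "black", "grey", "purple"]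

-- ===== PORT A =====
-- inner loop: for k in range(nTot): a = colorList[k]; if a in lColor: continue; else: break
def pvInnerA (lColor : List String) : List String → String → String
  | [], a => a
  | c :: rest, _ => if c ∈ lColor then pvInnerA lColor rest c else c

-- outer loop: for ki in range(n, i): ... lColor.append(a)
def pvLoopA : List String → Nat → List String
  | l, 0 => l
  | l, m + 1 => pvLoopA (l ++ [pvInnerA l pvColorList ""]) m

def selectColor (lColor : List String) (i : Int) : List String :=
  let n : Int := lColor.length
  if n > i then lColor
  else pvLoopA lColor (i - n).toNat

-- ===== PORT B =====
def selectColor_alt (lColor : List String) (i : Int) : List String :=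
  let n : Int := lColor.length
  if n > i then lColor
  else
    let need : Int := i - n
    let unused := pvColorList.filter (fun c => decide (c ∉ lColor))
    let fill := PySem.List.slice unused none (some need) ++
      List.replicate (need - unused.length).toNat (PySem.List.pyGetD pvColorList (-1) "")
    lColor ++ fill

-- ===== PRECONDITION & SPEC =====
def Spec_selectColor (lColor : List String) (i : Int) (out : List String) : Prop := out = selectColor_alt lColor i
instance (lColor : List String) (i : Int) (out : List String) : Decidable (Spec_selectColor lColor i out) := by unfold Spec_selectColor; infer_instance

-- ===== CLAIM (what is proved, stated in full; the proofs are below) =====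
def Claim_equal_selectColor : Prop := ∀ (lColor : List String) (i : Int), Dom_selectColor lColor i → Spec_selectColor lColor i (selectColor lColor i)

-- ===== LEMMAS AND PROOFS =====

-- A's inner loop returns the first color of cl not in l, else the last color scanned.
lemma pvInnerA_eq (l : List String) : ∀ (cl : List String) (a : String),
    pvInnerA l cl a = match cl.filter (fun c => decide (c ∉ l)) with
      | [] => cl.getLastD a
      | u :: _ => u := by
  intro cl
  induction cl with
  | nil => intro a; rfl
  | cons c rest ih =>
    intro a
    by_cases hc : c ∈ l
    · simp only [pvInnerA, List.filter_cons, hc, not_true_eq_false, decide_false, List.getLastD_cons]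
      simpa using ih c
    · simp [pvInnerA, hc]

-- appending a to l refines the unused-filter by removing a
lemma filter_append_single (l : List String) (a : String) (cl : List String) :
    cl.filter (fun c => decide (c ∉ l ++ [a]))
      = (cl.filter (fun c => decide (c ∉ l))).filter (fun c => decide (c ≠ a)) := by
  rw [List.filter_filter]
  apply List.filter_congr
  intro c _
  by_cases h1 : c ∈ l <;> by_cases h2 : c = a <;> simp [h1, h2]

lemma pvColorList_nodup : pvColorList.Nodup := by decide

-- main loop invariant
lemma pvLoopA_eq (m : Nat) : ∀ (l : List String),
    pvLoopA l m = l ++ (pvColorList.filter (fun c => decide (c ∉ l))).take m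
      ++ List.replicate (m - (pvColorList.filter (fun c => decide (c ∉ l))).length) "purple" := by
  induction m with
  | zero => intro l; simp [pvLoopA]
  | succ m ih =>
    intro l
    have hnd : (pvColorList.filter (fun c => decide (c ∉ l))).Nodup :=
      List.Nodup.filter _ pvColorList_nodup
    rw [pvLoopA, ih]
    cases hF : pvColorList.filter (fun c => decide (c ∉ l)) with
    | nil =>
      have ha : pvInnerA l pvColorList "" = "purple" := by
        rw [pvInnerA_eq l pvColorList "", hF]; rfl
      have hF' : pvColorList.filter (fun c => decide (c ∉ l ++ ["purple"])) = [] := by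
        rw [filter_append_single, hF]; rfl
      rw [ha, hF']
      simp [List.replicate_succ, List.append_assoc]
    | cons u rest =>
      have ha : pvInnerA l pvColorList "" = u := by
        rw [pvInnerA_eq l pvColorList ""]; rw [hF]
      have hu : u ∉ rest := by
        rw [hF] at hnd; exact (List.nodup_cons.mp hnd).1
      have hF' : pvColorList.filter (fun c => decide (c ∉ l ++ [u])) = rest := by
        rw [filter_append_single, hF, List.filter_cons]
        simp only [ne_eq, not_true_eq_false, decide_false]
        exact List.filter_eq_self.mpr (fun c hc => by
          simp only [decide_eq_true_eq]
          exact fun h : c = u => hu (h ▸ hc))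
      rw [ha, hF']
      simp [List.take_succ_cons, List.append_assoc, Nat.succ_sub_succ]

-- ===== VERDICT (by name: the statement is the Claim_ definition above) =====
theorem selectColor_spec : Claim_equal_selectColor := by
  intro lColor i _
  unfold Spec_selectColor selectColor selectColor_alt
  simp only
  by_cases h : (lColor.length : Int) > i
  · rw [if_pos h, if_pos h]
  · rw [if_neg h, if_neg h]
    have hge : (0 : Int) ≤ i - lColor.length := by omega
    rw [pvLoopA_eq]
    have hlast : PySem.List.pyGetD pvColorList (-1) "" = "purple" := by decide
    rw [hlast, PySem.List.slice_to _ hge]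
    have hcnt : (i - (lColor.length : Int)).toNat
        - (pvColorList.filter (fun c => decide (c ∉ lColor))).length
        = (i - (lColor.length : Int)
            - ((pvColorList.filter (fun c => decide (c ∉ lColor))).length : Int)).toNat := by
      omega
    rw [hcnt, List.append_assoc]
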